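-- pv_equiv track=rewrite | github.com/roussineau/IP-Algo1 | guia-8-resolucion.py | posiciones_pares_in
-- ===== SOURCE A (Python) =====
-- def posiciones_pares_in(s: list) -> list:
--     lista: list = []
--     for i in range(len(s)):
--         if i%2 == 0:
--             lista.append(s[i])
--         else:
--             lista.append(0)
--     return lista
-- ===== SOURCE B (Python) =====
-- def posiciones_pares_in(s: list) -> list:
--     lista = list(s)
--     lista[1::2] = [0] * len(lista[1::2])
--     return lista
-- ===== Notes on version B (the rewrite author's own statement) =====
-- stated objective: simpler
-- what changed: Replaces the index loop with parity branching by a shallow copy plus one bulk slice assignment zeroing the odd positions.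
import Mathlib
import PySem

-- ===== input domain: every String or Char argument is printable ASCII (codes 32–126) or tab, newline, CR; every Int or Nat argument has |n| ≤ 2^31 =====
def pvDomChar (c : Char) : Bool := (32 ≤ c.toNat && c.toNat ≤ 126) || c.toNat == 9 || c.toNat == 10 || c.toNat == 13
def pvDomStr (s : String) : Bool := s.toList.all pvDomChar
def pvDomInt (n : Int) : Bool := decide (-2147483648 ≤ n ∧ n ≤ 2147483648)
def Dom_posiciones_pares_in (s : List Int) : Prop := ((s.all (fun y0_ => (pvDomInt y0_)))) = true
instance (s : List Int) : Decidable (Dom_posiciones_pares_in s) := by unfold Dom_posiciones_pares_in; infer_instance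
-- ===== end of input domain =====

-- B replaces A's index loop with parity branching by a copy plus one bulk slice assignment
-- zeroing the odd positions (objective: simpler).


-- ===== PORT A =====
-- for i in range(len(s)): if i%2==0: lista.append(s[i]) else: lista.append(0)
-- (s[i] is always in range here, so pyGetD with any default is exact)
def posiciones_pares_in (s : List Int) : List Int :=
  (PySem.List.pyRange 0 (s.length : Int) 1).foldl
    (fun lista i => if i % 2 == 0 then lista ++ [PySem.List.pyGetD s i 0] else lista ++ [0]) []

-- ===== PORT B =====
-- hand-port of 'lista[1::2] = [0] * len(lista[1::2])': exact — the extended slice s[1::2]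
-- names the odd positions, and the assignment overwrites each of them with 0 while all
-- even positions keep the copied values.
def pvSetOddZero : List Int → List Int
  | [] => []
  | [x] => [x]
  | x :: _ :: t => x :: 0 :: pvSetOddZero t

def posiciones_pares_in_alt (s : List Int) : List Int := pvSetOddZero s

-- ===== PRECONDITION & SPEC =====
def Spec_posiciones_pares_in (s : List Int) (out : List Int) : Prop := out = posiciones_pares_in_alt s
instance (s : List Int) (out : List Int) : Decidable (Spec_posiciones_pares_in s out) := by unfold Spec_posiciones_pares_in; infer_instance

-- ===== CLAIM (what is proved, stated in full; the proofs are below) =====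
def Claim_equal_posiciones_pares_in : Prop := ∀ (s : List Int), Dom_posiciones_pares_in s → Spec_posiciones_pares_in s (posiciones_pares_in s)

-- ===== LEMMAS AND PROOFS =====
theorem pvA_eq_map (s : List Int) :
    posiciones_pares_in s =
      (PySem.List.pyRange 0 (s.length : Int) 1).map
        (fun i => if i % 2 == 0 then PySem.List.pyGetD s i 0 else 0) := by
  unfold posiciones_pares_in
  have h : ∀ (l : List Int) (acc : List Int),
      l.foldl (fun lista i => if i % 2 == 0 then lista ++ [PySem.List.pyGetD s i 0] else lista ++ [0]) acc
        = acc ++ l.map (fun i => if i % 2 == 0 then PySem.List.pyGetD s i 0 else 0) := by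
    intro l
    induction l with
    | nil => simp
    | cons a t ih =>
      intro acc
      rw [List.foldl_cons, List.map_cons]
      cases a % 2 == 0
      · simp only [Bool.false_eq_true, ite_false]
        rw [ih]; simp [List.append_assoc]
      · simp only [ite_true]
        rw [ih]; simp [List.append_assoc]
  simpa using h _ []

theorem pvB_length (s : List Int) : (pvSetOddZero s).length = s.length := by
  induction s using pvSetOddZero.induct <;> simp [pvSetOddZero, *]

theorem pvB_get (s : List Int) (k : Nat) (hk : k < s.length) :
    (pvSetOddZero s)[k]'(by rw [pvB_length]; exact hk) =
      if k % 2 == 0 then s[k] else 0 := by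
  induction s using pvSetOddZero.induct generalizing k with
  | case1 => simp at hk
  | case2 x =>
    have hk0 : k = 0 := by simp at hk; omega
    subst hk0; simp [pvSetOddZero]
  | case3 x y t ih =>
    match k with
    | 0 => simp [pvSetOddZero]
    | 1 => simp [pvSetOddZero]
    | Nat.succ (Nat.succ m) =>
      have hm : m < t.length := by simp at hk; omega
      have := ih m hm
      have hmod : (m + 2) % 2 = m % 2 := by omega
      simpa [pvSetOddZero, hmod] using this

theorem posiciones_pares_in_eq (s : List Int) :
    posiciones_pares_in s = posiciones_pares_in_alt s := by
  unfold posiciones_pares_in_alt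
  rw [pvA_eq_map]
  apply List.ext_getElem
  · simp [pvB_length, PySem.List.length_pyRange_one]
  · intro k h1 h2
    rw [pvB_get s k (by simpa [pvB_length] using h2)]
    have hk : k < s.length := by simpa [pvB_length] using h2
    have hr : k < (((s.length : Int) - 0)).toNat := by simpa using hk
    rw [List.getElem_map, PySem.List.getElem_pyRange_one]
    have hcast : ((k : Int)) % 2 == 0 ↔ (k % 2 == 0) := by
      constructor <;> intro h <;> simp_all <;> omega
    by_cases hp : k % 2 = 0
    · have : ((k : Int)) % 2 = 0 := by omega
      simp [hp, this, PySem.List.pyGetD_of_nonneg, List.getElem?_eq_getElem hk]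
    · have : ¬ ((k : Int)) % 2 = 0 := by omega
      simp [hp, this]

-- ===== VERDICT (by name: the statement is the Claim_ definition above) =====
theorem posiciones_pares_in_spec : Claim_equal_posiciones_pares_in := by
  intro s _
  unfold Spec_posiciones_pares_in
  exact posiciones_pares_in_eq s
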